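-- pv_equiv track=rewrite | github.com/Hofei90/Hofei_AdventofCode | day6.py | read_group_answers_1
-- ===== SOURCE A (Python) =====
-- def read_group_answers_1(inhalt):
--     groups_answers = []
--     answers = []
--     for group_answer in inhalt:
--         group_answer = group_answer.strip()
--         if group_answer:
--             for answer in group_answer:
--                 answers.append(answer)
--         else:
--             groups_answers.append(set(answers))
--             answers = []
--     return groups_answers
-- ===== SOURCE B (Python) =====
-- def read_group_answers_1(inhalt):
--     def go(lines):
--         if '' not in lines:
--             return []
--         j = lines.index('')
--         return [set(''.join(lines[:j]))] + go(lines[j + 1:])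
--     return go([line.strip() for line in inhalt])
-- ===== Notes on version B (the rewrite author's own statement) =====
-- stated objective: alternative
-- what changed: Replaces A's single stateful pass (per-character accumulator flushed at each blank line) by a recursive decomposition: strip all lines first, then repeatedly split at the first blank line, turning each prefix into set(''.join(prefix)) and recursing on the remainder.
import Mathlib
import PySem

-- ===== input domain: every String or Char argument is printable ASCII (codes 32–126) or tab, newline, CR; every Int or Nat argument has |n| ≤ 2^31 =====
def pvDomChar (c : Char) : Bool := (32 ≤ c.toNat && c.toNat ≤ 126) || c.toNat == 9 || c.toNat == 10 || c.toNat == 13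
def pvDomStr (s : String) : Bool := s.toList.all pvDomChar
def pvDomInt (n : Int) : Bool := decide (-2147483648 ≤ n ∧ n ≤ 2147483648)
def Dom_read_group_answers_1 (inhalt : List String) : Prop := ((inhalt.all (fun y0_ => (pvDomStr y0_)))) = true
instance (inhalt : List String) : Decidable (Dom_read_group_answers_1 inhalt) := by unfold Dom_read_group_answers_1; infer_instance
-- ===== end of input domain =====

-- B replaces A's single accumulator loop by a recursive split at the first blank line (slice up to it,
-- join, make a set, recurse on the rest); objective: alternative decomposition, not faster.

-- ===== PORT A =====
-- sets of 1-char strings: iterating a Python string yields 1-char strings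
def read_group_answers_1 (inhalt : List String) : List (List String) :=
  (inhalt.foldl
    (fun (st : List (List String) × List String) (group_answer : String) =>
      let ga := PySem.Chars.strip group_answer.toList
      if ga ≠ [] then
        (st.1, ga.foldl (fun answers c => answers ++ [String.ofList [c]]) st.2)
      else
        (st.1 ++ [PySem.Set.ofList st.2], ([] : List String)))
    (([] : List (List String)), ([] : List String))).1

-- ===== PORT B =====
-- go(lines): if no blank line return [], else split at the first blank (index j), emit
-- set(''.join(lines[:j])) and recurse on lines[j+1:]
def rgaGo (lines : List (List Char)) : List (List String) :=
  match h : PySem.List.index? lines ([] : List Char) with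
  | none => []
  | some j =>
      PySem.Set.ofList
          ((PySem.List.slice lines none (some (j : Int))).flatten.map (fun c => String.ofList [c]))
        :: rgaGo (PySem.List.slice lines (some ((j : Int) + 1)) none)
termination_by lines.length
decreasing_by
  have hj := PySem.List.getElem_of_index?_eq_some h
  obtain ⟨hk, -⟩ := hj
  have : (PySem.List.slice lines (some ((j : Int) + 1)) none) = lines.drop (j + 1) := by
    have : ((j : Int) + 1) = ((j + 1 : Nat) : Int) := by push_cast; ring
    rw [this, PySem.List.slice_from_natCast]
  simp [this, List.length_drop]
  omega

def read_group_answers_1_alt (inhalt : List String) : List (List String) :=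
  rgaGo (inhalt.map (fun line => PySem.Chars.strip line.toList))

-- ===== PRECONDITION & SPEC =====
def Spec_read_group_answers_1 (inhalt : List String) (out : List (List String)) : Prop := out = read_group_answers_1_alt inhalt
instance (inhalt : List String) (out : List (List String)) : Decidable (Spec_read_group_answers_1 inhalt out) := by unfold Spec_read_group_answers_1; infer_instance

-- ===== CLAIM (what is proved, stated in full; the proofs are below) =====
def Claim_equal_read_group_answers_1 : Prop := ∀ (inhalt : List String), Dom_read_group_answers_1 inhalt → Spec_read_group_answers_1 inhalt (read_group_answers_1 inhalt)

-- ===== LEMMAS AND PROOFS =====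

-- A's fold body, on stripped lines
def rgaStep (st : List (List String) × List String) (ga : List Char) :
    List (List String) × List String :=
  if ga ≠ [] then
    (st.1, ga.foldl (fun answers c => answers ++ [String.ofList [c]]) st.2)
  else
    (st.1 ++ [PySem.Set.ofList st.2], ([] : List String))

-- rgaGo with the pending accumulator of answers prefixed to the first emitted set
def rgaAux (ans : List String) (lines : List (List Char)) : List (List String) :=
  match PySem.List.index? lines ([] : List Char) with
  | none => []
  | some j =>
      PySem.Set.ofList (ans ++ (lines.take j).flatten.map (fun c => String.ofList [c]))
        :: rgaGo (lines.drop (j + 1))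

theorem rgaGo_eq_aux (lines : List (List Char)) : rgaGo lines = rgaAux [] lines := by
  rw [rgaGo, rgaAux]
  cases h : PySem.List.index? lines ([] : List Char) with
  | none => rfl
  | some j =>
      have h2 : PySem.List.slice lines (some ((j : Int) + 1)) none = lines.drop (j + 1) := by
        have he : ((j : Int) + 1) = ((j + 1 : Nat) : Int) := by push_cast; ring
        rw [he, PySem.List.slice_from_natCast]
      simp [PySem.List.slice_to_natCast, h2]

theorem rgaAux_blank (ans : List String) (ls : List (List Char)) :
    rgaAux ans (([] : List Char) :: ls) = PySem.Set.ofList ans :: rgaAux [] ls := by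
  rw [rgaAux, PySem.List.index?_cons_self, ← rgaGo_eq_aux]
  simp

theorem rgaAux_cons (ans : List String) {l : List Char} (ls : List (List Char))
    (hl : l ≠ []) :
    rgaAux ans (l :: ls) = rgaAux (ans ++ l.map (fun c => String.ofList [c])) ls := by
  rw [rgaAux, rgaAux, PySem.List.index?_cons_of_ne ls hl]
  cases h : PySem.List.index? ls ([] : List Char) with
  | none => rfl
  | some j => simp

theorem rga_foldl_eq (lines : List (List Char)) :
    ∀ (gs : List (List String)) (ans : List String),
      (lines.foldl rgaStep (gs, ans)).1 = gs ++ rgaAux ans lines := by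
  induction lines with
  | nil => intro gs ans; simp [rgaAux, PySem.List.index?]
  | cons l ls ih =>
      intro gs ans
      by_cases hl : l = []
      · subst hl
        have hstep : rgaStep (gs, ans) [] = (gs ++ [PySem.Set.ofList ans], []) := by
          simp [rgaStep]
        rw [List.foldl_cons, hstep, ih, rgaAux_blank]
        simp
      · have hstep : rgaStep (gs, ans) l =
            (gs, ans ++ l.map (fun c => String.ofList [c])) := by
          unfold rgaStep
          rw [if_pos hl, PySem.List.foldl_append_singleton_eq_map]
        rw [List.foldl_cons, hstep, ih, rgaAux_cons ans ls hl]

-- ===== VERDICT (by name: the statement is the Claim_ definition above) =====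
theorem read_group_answers_1_spec : Claim_equal_read_group_answers_1 := by
  intro inhalt _
  show read_group_answers_1 inhalt = read_group_answers_1_alt inhalt
  have key : read_group_answers_1 inhalt =
      (List.foldl (fun st ga => rgaStep st (PySem.Chars.strip ga.toList))
        (([] : List (List String)), ([] : List String)) inhalt).1 := rfl
  have key2 : List.foldl (fun st ga => rgaStep st (PySem.Chars.strip ga.toList))
      (([] : List (List String)), ([] : List String)) inhalt =
      List.foldl rgaStep (([] : List (List String)), ([] : List String))
        (inhalt.map (fun line => PySem.Chars.strip line.toList)) :=
    List.foldl_map.symm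
  rw [key, key2, rga_foldl_eq, ← rgaGo_eq_aux]
  simp [read_group_answers_1_alt]
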